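-- pv_equiv track=rewrite | github.com/AnasImloul/Leetcode-Solutions | algorithms/N/Non-negative Integers without Consecutive Ones/Non-negative Integers without Consecutive Ones.py | findIntegers
-- ===== SOURCE A (Python) =====
-- def findIntegers(n: int) -> int:
--     b=(bin(n).replace("0b",""))
--     dp=[[[[-1 for i in range(2)] for i in range(2)] for i in range(2)] for i in range(30)]
--     def fun(i,last,tight,leading_zeros):
--         if i==len(str(b)):
--             return 1
--         if dp[i][tight][leading_zeros][last]!=-1:
--             return dp[i][tight][leading_zeros][last]
--         end=1
--         if tight==1:
--             end = int(b[i])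
--         res=0
--         for j in range(end+1):
--             if j==0 and leading_zeros==1:
--                 res+=fun(i+1,j,tight&int(j==end),1)
--             else:
--                 if j==0:
--                     res+=fun(i+1,j,tight&int(j==end),0)
--                 else:
--                     if last!=j:
--                         res+=fun(i+1,j,tight&int(j==end),0)
--         dp[i][tight][leading_zeros][last] = res
--         return res
--     return fun(0,0,1,1)
-- ===== SOURCE B (Python) =====
-- def findIntegers(n: int) -> int:
--     # Fibonacci-count linear scan over the binary digits of n (msb first).
--     def fib(k):
--         # number of k-bit strings (leading zeros allowed) with no two consecutive ones
--         a, b = 1, 2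
--         for _ in range(k):
--             a, b = b, a + b
--         return a
--     bits = bin(n)[2:]
--     res = 0
--     prev = 0
--     for i, c in enumerate(bits):
--         if c == '1':
--             res += fib(len(bits) - 1 - i)
--             if prev == 1:
--                 return res
--             prev = 1
--         else:
--             prev = 0
--     return res + 1
-- ===== Notes on version B (the rewrite author's own statement) =====
-- stated objective: simpler
-- what changed: Replaced the memoized tight/leading-zero digit DP by a single left-to-right scan of n's binary digits that adds a precomputed Fibonacci count for each set bit and stops early at the first pair of consecutive ones.
import Mathlib
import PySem

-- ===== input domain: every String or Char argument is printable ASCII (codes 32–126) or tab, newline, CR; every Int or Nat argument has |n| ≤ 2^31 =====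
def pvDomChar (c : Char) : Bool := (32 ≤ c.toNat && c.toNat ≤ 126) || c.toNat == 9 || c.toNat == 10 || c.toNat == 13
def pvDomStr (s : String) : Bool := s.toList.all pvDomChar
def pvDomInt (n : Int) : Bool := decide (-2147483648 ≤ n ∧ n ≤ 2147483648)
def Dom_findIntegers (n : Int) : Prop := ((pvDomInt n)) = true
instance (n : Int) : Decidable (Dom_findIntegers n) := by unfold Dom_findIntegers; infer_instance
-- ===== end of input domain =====

-- B replaces A's memoized tight/leading-zero digit DP by a single left-to-right scan of the
-- binary digits adding Fibonacci counts (objective: simpler).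

-- ===== PORT A =====
-- bin(n).replace("0b","") as the list of binary digits, msb first ('0' → [0]).
-- Exact for n ≥ 0 (Pre_ excludes n < 0, where Python A raises ValueError).
def pvNatBits (m : Nat) : List Int :=
  if m = 0 then [] else pvNatBits (m / 2) ++ [((m % 2 : Nat) : Int)]
decreasing_by exact Nat.div_lt_self (Nat.pos_of_ne_zero (by assumption)) (by norm_num)

def pvBinDigits (n : Int) : List Int := if n ≤ 0 then [0] else pvNatBits n.toNat

-- A's inner recursion `fun(i,last,tight,leading_zeros)`, step for step, over the suffix of b
-- starting at index i.  The dp table of A is a pure memo cache of this recursion (always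
-- written with exactly the value the recursion returns), so it is ported as the recursion
-- itself; `tight & int(j==end)` is PySem.Int.band.
def pvFunA : List Int → Int → Int → Int → Int
  | [], _, _, _ => 1
  | c :: rest, last, tight, leading =>
    let e : Int := if tight = 1 then c else 1
    (PySem.List.pyRange 0 (e + 1) 1).foldl (fun res j =>
      if j = 0 ∧ leading = 1 then
        res + pvFunA rest j (PySem.Int.band tight (if j = e then 1 else 0)) 1
      else if j = 0 then
        res + pvFunA rest j (PySem.Int.band tight (if j = e then 1 else 0)) 0
      else if last ≠ j then
        res + pvFunA rest j (PySem.Int.band tight (if j = e then 1 else 0)) 0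
      else res) 0
termination_by b _ _ _ => b.length
decreasing_by all_goals simp [*]

def findIntegers (n : Int) : Int := pvFunA (pvBinDigits n) 0 1 1

-- ===== PORT B =====
-- fib(k) of Source B: the pair loop `for _ in range(k): a, b = b, a + b`, then a.
def pvCfib (k : Nat) : Int :=
  ((List.range k).foldl (fun (p : Int × Int) _ => (p.2, p.1 + p.2)) (1, 2)).1

-- Source B's scan loop over the digits with its early return; `rest.length` is len(bits)-1-i.
def pvLoopB : List Int → Int → Int → Int
  | [], _, res => res + 1
  | c :: rest, prev, res =>
    if c = 1 then
      let res' := res + pvCfib rest.length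
      if prev = 1 then res' else pvLoopB rest 1 res'
    else pvLoopB rest 0 res

def findIntegers_alt (n : Int) : Int := pvLoopB (pvBinDigits n) 0 0

-- ===== PRECONDITION & SPEC =====
-- Exactly where Python A returns: for n < 0 it raises ValueError (int('-')), and for
-- n ≥ 2^30 its 30-row dp table raises IndexError.
def Pre_findIntegers (n : Int) : Prop := 0 ≤ n ∧ n < 1073741824
instance (n : Int) : Decidable (Pre_findIntegers n) := by unfold Pre_findIntegers; infer_instance

def pvWitness_findIntegers : Int := 5

def Spec_findIntegers (n : Int) (out : Int) : Prop := out = findIntegers_alt n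
instance (n : Int) (out : Int) : Decidable (Spec_findIntegers n out) := by unfold Spec_findIntegers; infer_instance

-- ===== CLAIM (what is proved, stated in full; the proofs are below) =====
def Claim_equal_findIntegers : Prop := ∀ (n : Int), Dom_findIntegers n → Pre_findIntegers n → Spec_findIntegers n (findIntegers n)

-- ===== LEMMAS AND PROOFS =====

-- mathematical Fibonacci used only by the proofs: F L = #(L-bit strings w/o consecutive ones)
def pvF : Nat → Int
  | 0 => 1
  | 1 => 2
  | (k + 2) => pvF (k + 1) + pvF k

-- G L = value of pvFunA b 1 0 0 for |b| = L
def pvG : Nat → Int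
  | 0 => 1
  | (k + 1) => pvF k

theorem pvF_succ_G (L : Nat) : pvF (L + 1) = pvF L + pvG L := by
  cases L with
  | zero => simp [pvF, pvG]
  | succ k => simp [pvF, pvG]

theorem pvCfib_pair (k : Nat) :
    (List.range k).foldl (fun (p : Int × Int) _ => (p.2, p.1 + p.2)) (1, 2) = (pvF k, pvF (k + 1)) := by
  induction k with
  | zero => simp [pvF]
  | succ m ih =>
    rw [List.range_succ, List.foldl_append, ih]
    simp [pvF]; ring

theorem pvCfib_eq (k : Nat) : pvCfib k = pvF k := by
  simp [pvCfib, pvCfib_pair]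

theorem pvNatBits_valid (m : Nat) : ∀ x ∈ pvNatBits m, x = 0 ∨ x = 1 := by
  induction m using pvNatBits.induct with
  | case1 => simp [pvNatBits]
  | case2 m hm ih =>
    rw [pvNatBits, if_neg hm]
    intro x hx
    rcases List.mem_append.1 hx with h | h
    · exact ih x h
    · rw [List.mem_singleton] at h
      subst h
      rcases Nat.mod_two_eq_zero_or_one m with h2 | h2 <;> rw [h2] <;> simp

theorem pvBinDigits_valid (n : Int) : ∀ x ∈ pvBinDigits n, x = 0 ∨ x = 1 := by
  unfold pvBinDigits
  split
  · simp
  · exact pvNatBits_valid _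

-- ground evaluation facts for the concrete ranges and bit-ands A's loop hits
theorem pvRange1 : PySem.List.pyRange 0 1 1 = [0] := by decide
theorem pvRange2 : PySem.List.pyRange 0 2 1 = [0, 1] := by decide
theorem pvBand01 : PySem.Int.band 0 1 = (0 : Int) := by decide

-- untight states: pvFunA with tight = 0 counts the remaining strings by Fibonacci
theorem pvFunA_free (b : List Int) :
    pvFunA b 0 0 0 = pvF b.length ∧ pvFunA b 0 0 1 = pvF b.length ∧ pvFunA b 1 0 0 = pvG b.length := by
  induction b with
  | nil => simp [pvFunA, pvF, pvG]
  | cons c rest ih =>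
    obtain ⟨h00, h01, h10⟩ := ih
    refine ⟨?_, ?_, ?_⟩ <;>
      simp only [pvFunA] <;>
      simp [pvRange2, pvBand01, List.foldl, h00, h01, h10, List.length_cons, pvF_succ_G, pvG]

theorem pvLoopB_main (b : List Int) (hv : ∀ x ∈ b, x = 0 ∨ x = 1) :
    ∀ last leading r : Int, (last = 0 ∨ last = 1) → (leading = 0 ∨ leading = 1) →
      (leading = 1 → last = 0) →
      pvFunA b last 1 leading + r = pvLoopB b last r := by
  induction b with
  | nil =>
    intro last leading r _ _ _
    simp only [pvFunA, pvLoopB]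
    ring
  | cons c rest ih =>
    intro last leading r hlast hlead hcompat
    have hv' : ∀ x ∈ rest, x = 0 ∨ x = 1 := fun x hx => hv x (List.mem_cons_of_mem _ hx)
    have hc : c = 0 ∨ c = 1 := hv c (List.mem_cons_self ..)
    rcases hc with hc | hc
    · -- digit 0: stay tight, prev := 0
      subst hc
      have hstep : pvFunA (0 :: rest) last 1 leading =
          (if leading = 1 then pvFunA rest 0 1 1 else pvFunA rest 0 1 0) := by
        simp only [pvFunA]
        rcases hlead with h | h <;>
          simp [h, pvRange1, List.foldl]
      have hB : pvLoopB (0 :: rest) last r = pvLoopB rest 0 r := by simp [pvLoopB]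
      rw [hstep, hB]
      rcases hlead with h | h
      · rw [if_neg (by simp [h])]
        exact ih hv' 0 0 r (Or.inl rfl) (Or.inl rfl) (by simp)
      · rw [if_pos h]
        exact ih hv' 0 1 r (Or.inl rfl) (Or.inr rfl) (fun _ => rfl)
    · -- digit 1
      subst hc
      rcases hlast with h | h
      · -- last = 0: F|rest| from the untight j = 0 branch plus the tight j = 1 branch
        subst h
        have hstep : pvFunA (1 :: rest) 0 1 leading =
            (if leading = 1 then pvFunA rest 0 0 1 else pvFunA rest 0 0 0) + pvFunA rest 1 1 0 := by
          simp only [pvFunA]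
          rcases hlead with hl | hl <;>
            simp [hl, pvRange2, List.foldl]
        have hB : pvLoopB (1 :: rest) 0 r = pvLoopB rest 1 (r + pvCfib rest.length) := by
          simp [pvLoopB]
        have hfree := pvFunA_free rest
        have hF : (if leading = 1 then pvFunA rest 0 0 1 else pvFunA rest 0 0 0) = pvF rest.length := by
          rcases hlead with hl | hl <;> simp [hl, hfree.1, hfree.2.1]
        rw [hstep, hB, hF, pvCfib_eq]
        have hIH := ih hv' 1 0 (r + pvCfib rest.length) (Or.inr rfl) (Or.inl rfl) (by simp)
        rw [pvCfib_eq] at hIH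
        linarith [hIH]
      · -- last = 1 (leading must be 0): early return; only the untight j = 0 branch counts
        subst h
        have hl0 : leading = 0 := by
          rcases hlead with hl | hl
          · exact hl
          · exact absurd (hcompat hl) (by norm_num)
        subst hl0
        have hstep : pvFunA (1 :: rest) 1 1 0 = pvFunA rest 0 0 0 := by
          simp only [pvFunA]
          simp [pvRange2, List.foldl]
        have hB : pvLoopB (1 :: rest) 1 r = r + pvCfib rest.length := by
          simp [pvLoopB]
        rw [hstep, hB, (pvFunA_free rest).1, pvCfib_eq]
        ring

-- ===== VERDICT (by name: the statement is the Claim_ definition above) =====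
theorem findIntegers_spec : Claim_equal_findIntegers := by
  unfold Claim_equal_findIntegers
  intro n _ _
  unfold Spec_findIntegers findIntegers findIntegers_alt
  have h := pvLoopB_main (pvBinDigits n) (pvBinDigits_valid n) 0 1 0
    (Or.inl rfl) (Or.inr rfl) (fun _ => rfl)
  linarith [h]
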